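-- pv_equiv track=rewrite | github.com/Sonvisage12/QMS-WITH-BROKER | mqtt_queue_manager6.py | build_blended_queue
-- ===== SOURCE A (Python) =====
-- def build_blended_queue(sharedQueue, queueB, ratio_shared=2, ratio_b=4):
--     blended = []
--     i, j = 0, 0
--     while i < len(sharedQueue) or j < len(queueB):
--         for _ in range(ratio_shared):
--             if i < len(sharedQueue):
--                 blended.append(sharedQueue[i])
--                 i += 1
--         for _ in range(ratio_b):
--             if j < len(queueB):
--                 blended.append(queueB[j])
--                 j += 1
--     return blended
-- ===== SOURCE B (Python) =====
-- def build_blended_queue(sharedQueue, queueB, ratio_shared=2, ratio_b=4):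
--     def chunks(xs, k):
--         cs = []
--         if k > 0:
--             p = 0
--             while p < len(xs):
--                 cs.append(xs[p:p+k])
--                 p += k
--         return cs
--     ca = chunks(sharedQueue, ratio_shared)
--     cb = chunks(queueB, ratio_b)
--     pad = [[]] * abs(len(ca) - len(cb))
--     if len(ca) < len(cb):
--         ca = ca + pad
--     else:
--         cb = cb + pad
--     out = []
--     for a, b in zip(ca, cb):
--         out += a
--         out += b
--     return out
-- ===== Notes on version B (the rewrite author's own statement) =====
-- stated objective: alternative
-- what changed: Replaces the single while loop with two index counters and per-element guarded inner for-loops by a chunk-and-zip decomposition: each queue is pre-split into fixed-size chunks by slicing, the shorter chunk list is padded with empty chunks, and the two chunk sequences are zipped and concatenated.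
import Mathlib
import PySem

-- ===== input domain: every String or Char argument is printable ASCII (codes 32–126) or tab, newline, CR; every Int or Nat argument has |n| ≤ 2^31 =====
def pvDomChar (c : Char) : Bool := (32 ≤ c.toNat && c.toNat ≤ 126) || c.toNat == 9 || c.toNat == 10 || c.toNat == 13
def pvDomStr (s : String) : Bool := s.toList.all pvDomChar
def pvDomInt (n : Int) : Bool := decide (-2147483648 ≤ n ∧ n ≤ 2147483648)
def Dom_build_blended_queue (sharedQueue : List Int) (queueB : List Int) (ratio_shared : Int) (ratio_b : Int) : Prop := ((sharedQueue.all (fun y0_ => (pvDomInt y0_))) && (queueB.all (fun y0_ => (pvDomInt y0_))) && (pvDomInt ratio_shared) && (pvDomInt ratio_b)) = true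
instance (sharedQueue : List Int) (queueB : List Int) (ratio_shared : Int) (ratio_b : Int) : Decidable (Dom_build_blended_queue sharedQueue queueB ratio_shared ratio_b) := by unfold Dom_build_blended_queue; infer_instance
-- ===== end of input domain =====

-- B replaces A's element-at-a-time while/for blending by a chunk-and-zip decomposition
-- (pre-split each queue into ratio-sized slices, pad, zip, concatenate); same return value on Pre_.

-- ===== PORT A =====
-- A keeps a result list and two index counters and, each round of the outer
-- while, runs two guarded inner for-loops appending one element at a time.
-- The while loop is ported with a fuel counter (sharedQueue.length + queueB.length + 1
-- rounds always suffice when A terminates; Pre_ excludes the inputs on which A loops forever).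

-- inner 'for _ in range(r): if i < len(xs): append; i += 1'
def pvStepA (xs : List Int) (acc : List Int) (i : Nat) : Nat → List Int × Nat
  | 0 => (acc, i)
  | c + 1 =>
    if i < xs.length then pvStepA xs (acc ++ [xs.getD i 0]) (i + 1) c
    else pvStepA xs acc i c

-- outer 'while i < len(sharedQueue) or j < len(queueB)'
def pvLoopA (xs ys : List Int) (rs rb : Int) : Nat → List Int → Nat → Nat → List Int
  | 0, acc, _, _ => acc
  | f + 1, acc, i, j =>
    if i < xs.length ∨ j < ys.length then
      let s1 := pvStepA xs acc i rs.toNat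
      let s2 := pvStepA ys s1.1 j rb.toNat
      pvLoopA xs ys rs rb f s2.1 s1.2 s2.2
    else acc

def build_blended_queue (sharedQueue : List Int) (queueB : List Int) (ratio_shared : Int) (ratio_b : Int) : List Int :=
  pvLoopA sharedQueue queueB ratio_shared ratio_b (sharedQueue.length + queueB.length + 1) [] 0 0

-- ===== PORT B =====
-- B pre-splits each queue into chunks of its ratio by slicing, pads the shorter
-- chunk list with empty chunks, and concatenates the zipped chunk pairs.

-- 'while p < len(xs): cs.append(xs[p:p+k]); p += k'  (fuel: xs.length + 1 rounds suffice since k > 0)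
def pvChunksLoop (xs : List Int) (k : Int) : Nat → List (List Int) → Nat → List (List Int)
  | 0, cs, _ => cs
  | f + 1, cs, p =>
    if p < xs.length then
      pvChunksLoop xs k f (cs ++ [PySem.List.slice xs (some (p : Int)) (some ((p : Int) + k))]) (p + k.toNat)
    else cs

def pvChunks (xs : List Int) (k : Int) : List (List Int) :=
  if 0 < k then pvChunksLoop xs k (xs.length + 1) [] 0 else []

def build_blended_queue_alt (sharedQueue : List Int) (queueB : List Int) (ratio_shared : Int) (ratio_b : Int) : List Int :=
  let ca := pvChunks sharedQueue ratio_shared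
  let cb := pvChunks queueB ratio_b
  let pad : List (List Int) := List.replicate ((ca.length : Int) - (cb.length : Int)).natAbs []
  let ca' := if ca.length < cb.length then ca ++ pad else ca
  let cb' := if ca.length < cb.length then cb else cb ++ pad
  (ca'.zip cb').foldl (fun out ab => out ++ ab.1 ++ ab.2) []

-- ===== PRECONDITION & SPEC =====
-- A's while loop never terminates when a nonempty queue has a ratio < 1 (its
-- counter can never advance past that queue); Pre_ excludes exactly those inputs.
def Pre_build_blended_queue (sharedQueue : List Int) (queueB : List Int) (ratio_shared : Int) (ratio_b : Int) : Prop :=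
  (sharedQueue = [] ∨ 1 ≤ ratio_shared) ∧ (queueB = [] ∨ 1 ≤ ratio_b)
instance (sharedQueue : List Int) (queueB : List Int) (ratio_shared : Int) (ratio_b : Int) : Decidable (Pre_build_blended_queue sharedQueue queueB ratio_shared ratio_b) := by unfold Pre_build_blended_queue; infer_instance

def pvWitness_build_blended_queue : List Int × List Int × Int × Int := ([1, 2, 3, 4, 5], [10, 20, 30], 2, 4)

def Spec_build_blended_queue (sharedQueue : List Int) (queueB : List Int) (ratio_shared : Int) (ratio_b : Int) (out : List Int) : Prop := out = build_blended_queue_alt sharedQueue queueB ratio_shared ratio_b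
instance (sharedQueue : List Int) (queueB : List Int) (ratio_shared : Int) (ratio_b : Int) (out : List Int) : Decidable (Spec_build_blended_queue sharedQueue queueB ratio_shared ratio_b out) := by unfold Spec_build_blended_queue; infer_instance

-- ===== CLAIM (what is proved, stated in full; the proofs are below) =====
def Claim_equal_build_blended_queue : Prop := ∀ (sharedQueue : List Int) (queueB : List Int) (ratio_shared : Int) (ratio_b : Int), Dom_build_blended_queue sharedQueue queueB ratio_shared ratio_b → Pre_build_blended_queue sharedQueue queueB ratio_shared ratio_b → Spec_build_blended_queue sharedQueue queueB ratio_shared ratio_b (build_blended_queue sharedQueue queueB ratio_shared ratio_b)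

-- ===== LEMMAS AND PROOFS =====

-- reference chunking and mixing functions used only by the proofs
def pvChF : Nat → List Int → Nat → List (List Int)
  | 0, _, _ => []
  | f + 1, xs, k => if xs = [] then [] else xs.take k :: pvChF f (xs.drop k) k

def pvMixF : Nat → List Int → List Int → Nat → Nat → List Int
  | 0, _, _, _, _ => []
  | f + 1, xs, ys, a, b =>
    if xs = [] ∧ ys = [] then []
    else xs.take a ++ ys.take b ++ pvMixF f (xs.drop a) (ys.drop b) a b

def pvIzc : List (List Int) → List (List Int) → List Int
  | [], [] => []
  | [], d :: cb => d ++ pvIzc [] cb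
  | c :: ca, [] => c ++ pvIzc ca []
  | c :: ca, d :: cb => c ++ d ++ pvIzc ca cb

lemma pvStepA_eq (xs : List Int) (c : Nat) : ∀ (acc : List Int) (i : Nat), i ≤ xs.length →
    pvStepA xs acc i c = (acc ++ (xs.drop i).take c, min (i + c) xs.length) := by
  induction c with
  | zero =>
    intro acc i hi
    simp [pvStepA]
    omega
  | succ c ih =>
    intro acc i hi
    by_cases h : i < xs.length
    · rw [pvStepA, if_pos h, ih _ _ (by omega)]
      rw [List.drop_eq_getElem_cons h]
      simp [List.getD, List.getElem?_eq_getElem h]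
      refine ⟨?_, by omega⟩
      rw [List.drop_eq_getElem_cons h, List.take_succ_cons]
    · rw [pvStepA, if_neg h, ih _ _ hi]
      have hd : xs.drop i = [] := List.drop_eq_nil_of_le (by omega)
      rw [hd]
      simp
      omega

lemma pvLoopA_eq (xs ys : List Int) (rs rb : Int) :
    ∀ (f : Nat) (acc : List Int) (i j : Nat), i ≤ xs.length → j ≤ ys.length →
    pvLoopA xs ys rs rb f acc i j = acc ++ pvMixF f (xs.drop i) (ys.drop j) rs.toNat rb.toNat := by
  intro f
  induction f with
  | zero => intro acc i j hi hj; simp [pvLoopA, pvMixF]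
  | succ f ih =>
    intro acc i j hi hj
    rw [pvLoopA, pvMixF]
    by_cases h : i < xs.length ∨ j < ys.length
    · rw [if_pos h]
      have hx : ¬ (xs.drop i = [] ∧ ys.drop j = []) := by
        rcases h with h | h
        · intro ⟨h1, _⟩; exact absurd (List.drop_eq_nil_iff.mp h1) (by omega)
        · intro ⟨_, h2⟩; exact absurd (List.drop_eq_nil_iff.mp h2) (by omega)
      rw [if_neg hx]
      simp only [pvStepA_eq xs _ _ _ hi, pvStepA_eq ys _ _ _ hj]
      rw [ih _ _ _ (by omega) (by omega)]
      have dx : xs.drop (min (i + rs.toNat) xs.length) = (xs.drop i).drop rs.toNat := by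
        rw [List.drop_drop]
        rcases Nat.le_total (i + rs.toNat) xs.length with hle | hle
        · rw [Nat.min_eq_left hle]
        · rw [Nat.min_eq_right hle]
          rw [List.drop_eq_nil_of_le (le_refl _), List.drop_eq_nil_of_le (by omega)]
      have dy : ys.drop (min (j + rb.toNat) ys.length) = (ys.drop j).drop rb.toNat := by
        rw [List.drop_drop]
        rcases Nat.le_total (j + rb.toNat) ys.length with hle | hle
        · rw [Nat.min_eq_left hle]
        · rw [Nat.min_eq_right hle]
          rw [List.drop_eq_nil_of_le (le_refl _), List.drop_eq_nil_of_le (by omega)]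
      rw [dx, dy]
      simp
    · rw [if_neg h]
      push Not at h
      have h1 : xs.drop i = [] := List.drop_eq_nil_of_le (by omega)
      have h2 : ys.drop j = [] := List.drop_eq_nil_of_le (by omega)
      rw [if_pos ⟨h1, h2⟩]
      simp

lemma pvChunksLoop_eq (xs : List Int) (k : Int) (hk : 0 < k) :
    ∀ (f : Nat) (cs : List (List Int)) (p : Nat),
    pvChunksLoop xs k f cs p = cs ++ pvChF f (xs.drop p) k.toNat := by
  intro f
  induction f with
  | zero => intro cs p; simp [pvChunksLoop, pvChF]
  | succ f ih =>
    intro cs p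
    rw [pvChunksLoop, pvChF]
    by_cases h : p < xs.length
    · rw [if_pos h, ih]
      have hne : ¬ xs.drop p = [] := by
        intro hnil; exact absurd (List.drop_eq_nil_iff.mp hnil) (by omega)
      rw [if_neg hne]
      have hsl : PySem.List.slice xs (some (p : Int)) (some ((p : Int) + k)) = (xs.drop p).take k.toNat := by
        have hcast : ((p : Int) + k) = ((p + k.toNat : Nat) : Int) := by
          push_cast; omega
        rw [hcast, PySem.List.slice_natCast]
        congr 1
        omega
      rw [hsl, List.drop_drop]
      simp
    · rw [if_neg h]
      have hnil : xs.drop p = [] := List.drop_eq_nil_of_le (by omega)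
      rw [hnil, if_pos rfl]
      simp

lemma pvChF_fuel (k : Nat) (hk : 1 ≤ k) : ∀ (f f' : Nat) (xs : List Int),
    xs.length ≤ f → xs.length ≤ f' → pvChF f xs k = pvChF f' xs k := by
  intro f
  induction f with
  | zero =>
    intro f' xs h1 h2
    have : xs = [] := List.eq_nil_of_length_eq_zero (by omega)
    subst this
    cases f' <;> simp [pvChF]
  | succ f ih =>
    intro f' xs h1 h2
    by_cases hx : xs = []
    · subst hx; cases f' <;> simp [pvChF]
    · have hlen : 1 ≤ xs.length := by
        cases xs with
        | nil => exact absurd rfl hx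
        | cons a l => simp
      cases f' with
      | zero => omega
      | succ f' =>
        rw [pvChF, pvChF, if_neg hx, if_neg hx]
        congr 1
        exact ih f' (xs.drop k) (by simp; omega) (by simp; omega)

lemma pvChF_nil (a : Nat) (f : Nat) : pvChF (f + 1) ([] : List Int) a = [] := by
  simp [pvChF]

lemma pvChF_unfold (xs : List Int) (k : Nat) (hx : xs ≠ []) (hk : 1 ≤ k) :
    pvChF (xs.length + 1) xs k = xs.take k :: pvChF ((xs.drop k).length + 1) (xs.drop k) k := by
  rw [pvChF, if_neg hx]
  congr 1
  exact pvChF_fuel k hk _ _ _ (by simp) (by omega)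

lemma pvMix_eq_izc : ∀ (n : Nat) (xs ys : List Int) (a b : Nat),
    xs.length + ys.length ≤ n →
    (xs = [] ∨ 1 ≤ a) → (ys = [] ∨ 1 ≤ b) →
    pvMixF (n + 1) xs ys a b = pvIzc (pvChF (xs.length + 1) xs a) (pvChF (ys.length + 1) ys b) := by
  intro n
  induction n using Nat.strong_induction_on with
  | _ n ih =>
    intro xs ys a b hn ha hb
    by_cases hxy : xs = [] ∧ ys = []
    · obtain ⟨hx, hy⟩ := hxy; subst hx; subst hy
      simp [pvMixF, pvChF, pvIzc]
    · rw [pvMixF, if_neg hxy]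
      have hlen : 1 ≤ xs.length + ys.length := by
        rcases Decidable.not_and_iff_or_not.mp hxy with h | h
        · cases xs with
          | nil => exact absurd rfl h
          | cons c l => simp; omega
        · cases ys with
          | nil => exact absurd rfl h
          | cons c l => simp; omega
      obtain ⟨m, rfl⟩ : ∃ m, n = m + 1 := ⟨n - 1, by omega⟩
      have hdrop : (xs.drop a).length + (ys.drop b).length ≤ m := by
        rcases Decidable.not_and_iff_or_not.mp hxy with h | h
        · have h1 : 1 ≤ a := by tauto
          have h2 : 1 ≤ xs.length := by
            cases xs with
            | nil => exact absurd rfl h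
            | cons c l => simp
          simp; omega
        · have h1 : 1 ≤ b := by tauto
          have h2 : 1 ≤ ys.length := by
            cases ys with
            | nil => exact absurd rfl h
            | cons c l => simp
          simp; omega
      have hih := ih m (by omega) (xs.drop a) (ys.drop b) a b hdrop
        (by rcases ha with h | h
            · exact Or.inl (by simp [h])
            · exact Or.inr h)
        (by rcases hb with h | h
            · exact Or.inl (by simp [h])
            · exact Or.inr h)
      rw [hih]
      by_cases hx : xs = []
      · have hy : ys ≠ [] := by tauto
        have hb1 : 1 ≤ b := by tauto
        subst hx
        rw [pvChF_unfold ys b hy hb1]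
        simp only [List.length_nil, List.drop_nil, List.take_nil, pvChF_nil, pvIzc,
          List.nil_append]
      · by_cases hy : ys = []
        · have ha1 : 1 ≤ a := by tauto
          subst hy
          rw [pvChF_unfold xs a hx ha1]
          simp only [List.length_nil, List.drop_nil, List.take_nil, pvChF_nil, pvIzc,
            List.append_nil, List.nil_append]
        · have ha1 : 1 ≤ a := by tauto
          have hb1 : 1 ≤ b := by tauto
          rw [pvChF_unfold xs a hx ha1, pvChF_unfold ys b hy hb1]
          simp only [pvIzc, List.append_assoc]

lemma pvFoldlAppend : ∀ (l : List (List Int × List Int)) (out : List Int),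
    l.foldl (fun o ab => o ++ ab.1 ++ ab.2) out = out ++ l.flatMap (fun ab : List Int × List Int => ab.1 ++ ab.2) := by
  intro l
  induction l with
  | nil => intro out; simp
  | cons ab l ih => intro out; simp [List.foldl_cons, List.flatMap]

lemma pvZipPad : ∀ (ca cb : List (List Int)),
    ((ca ++ List.replicate (cb.length - ca.length) []).zip
      (cb ++ List.replicate (ca.length - cb.length) [])).flatMap (fun ab : List Int × List Int => ab.1 ++ ab.2)
      = pvIzc ca cb := by
  intro ca
  induction ca with
  | nil =>
    intro cb
    induction cb with
    | nil => simp [pvIzc]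
    | cons d cb ihb =>
      simp only [List.length_nil, List.length_cons, Nat.sub_zero, Nat.zero_sub,
        List.replicate_succ, List.replicate_zero, List.append_nil, List.nil_append] at ihb ⊢
      rw [List.zip_cons_cons, List.flatMap_cons, ihb]
      simp [pvIzc]
  | cons c ca iha =>
    intro cb
    cases cb with
    | nil =>
      have h := iha []
      simp only [List.length_nil, Nat.zero_sub, Nat.sub_zero, List.replicate_zero,
        List.append_nil, List.nil_append] at h
      simp only [List.length_cons, List.length_nil, Nat.zero_sub, Nat.sub_zero,
        List.replicate_succ, List.replicate_zero, List.append_nil, List.nil_append]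
      rw [List.zip_cons_cons, List.flatMap_cons, h]
      simp [pvIzc]
    | cons d cb =>
      simp only [List.length_cons, Nat.succ_sub_succ, List.cons_append]
      rw [List.zip_cons_cons, List.flatMap_cons, iha]
      simp [pvIzc]

lemma pvChunks_eq (xs : List Int) (k : Int) (h : xs = [] ∨ 1 ≤ k) :
    pvChunks xs k = pvChF (xs.length + 1) xs k.toNat := by
  by_cases hk : 0 < k
  · rw [pvChunks, if_pos hk, pvChunksLoop_eq xs k hk]
    simp
  · have hx : xs = [] := by
      rcases h with h | h
      · exact h
      · exact absurd h (by omega)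
    subst hx
    rw [pvChunks, if_neg hk]
    simp [pvChF]

-- ===== VERDICT (by name: the statement is the Claim_ definition above) =====
theorem build_blended_queue_spec : Claim_equal_build_blended_queue := by
  intro s q rs rb hdom hpre
  obtain ⟨hs, hq⟩ := hpre
  have ha : s = [] ∨ 1 ≤ rs.toNat := by
    rcases hs with h | h
    · exact Or.inl h
    · right; omega
  have hb : q = [] ∨ 1 ≤ rb.toNat := by
    rcases hq with h | h
    · exact Or.inl h
    · right; omega
  show build_blended_queue s q rs rb = build_blended_queue_alt s q rs rb
  have hA : build_blended_queue s q rs rb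
      = pvMixF (s.length + q.length + 1) s q rs.toNat rb.toNat := by
    rw [build_blended_queue, pvLoopA_eq s q rs rb _ [] 0 0 (by omega) (by omega)]
    simp
  have hB : build_blended_queue_alt s q rs rb
      = pvIzc (pvChF (s.length + 1) s rs.toNat) (pvChF (q.length + 1) q rb.toNat) := by
    rw [build_blended_queue_alt]
    rw [pvChunks_eq s rs hs, pvChunks_eq q rb hq]
    set ca := pvChF (s.length + 1) s rs.toNat with hca
    set cb := pvChF (q.length + 1) q rb.toNat with hcb
    by_cases hlt : ca.length < cb.length
    · rw [if_pos hlt, if_pos hlt]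
      have h1 : ((ca.length : Int) - (cb.length : Int)).natAbs = cb.length - ca.length := by omega
      have h2 : ca.length - cb.length = 0 := by omega
      rw [h1, pvFoldlAppend]
      have := pvZipPad ca cb
      rw [h2, List.replicate_zero, List.append_nil] at this
      rw [this]
      simp
    · rw [if_neg hlt, if_neg hlt]
      have h1 : ((ca.length : Int) - (cb.length : Int)).natAbs = ca.length - cb.length := by omega
      have h2 : cb.length - ca.length = 0 := by omega
      rw [h1, pvFoldlAppend]
      have := pvZipPad ca cb
      rw [h2, List.replicate_zero, List.append_nil] at this
      rw [this]
      simp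
  rw [hA, hB]
  exact pvMix_eq_izc (s.length + q.length) s q rs.toNat rb.toNat (le_refl _) ha hb
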